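-- pv_equiv track=rewrite | github.com/pypi-data/pypi-mirror-170 | packages/smog/smog-0.0.4-py3-none-any.whl/smog/xmpex.py | cleanup_xmp_dict
-- ===== SOURCE A (Python) =====
-- def cleanup_xmp_dict(xmp):
--     rc = {}
--     for ns_k, ns_v in xmp.items():
--         ns = {}
--         for k, v, _ in ns_v:
--             if k in ns:
--                 raise Exception("malformated input")
--             ns[k] = v
--         rc[ns_k] = ns
--     return rc
-- ===== SOURCE B (Python) =====
-- def cleanup_xmp_dict(xmp):
--     rc = {}
--     for ns_k, ns_v in xmp.items():
--         keys = sorted(k for k, _, _ in ns_v)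
--         for a, b in zip(keys, keys[1:]):
--             if a == b:
--                 raise Exception("malformated input")
--         rc[ns_k] = {k: v for k, v, _ in ns_v}
--     return rc
-- ===== Notes on version B (the rewrite author's own statement) =====
-- stated objective: alternative
-- what changed: Duplicate keys are detected by sorting each namespace's key list and scanning adjacent pairs for equality (sort-then-scan), instead of A's incremental hash-membership test while building the dict; the inner dict is then built in one comprehension.
import Mathlib
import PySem

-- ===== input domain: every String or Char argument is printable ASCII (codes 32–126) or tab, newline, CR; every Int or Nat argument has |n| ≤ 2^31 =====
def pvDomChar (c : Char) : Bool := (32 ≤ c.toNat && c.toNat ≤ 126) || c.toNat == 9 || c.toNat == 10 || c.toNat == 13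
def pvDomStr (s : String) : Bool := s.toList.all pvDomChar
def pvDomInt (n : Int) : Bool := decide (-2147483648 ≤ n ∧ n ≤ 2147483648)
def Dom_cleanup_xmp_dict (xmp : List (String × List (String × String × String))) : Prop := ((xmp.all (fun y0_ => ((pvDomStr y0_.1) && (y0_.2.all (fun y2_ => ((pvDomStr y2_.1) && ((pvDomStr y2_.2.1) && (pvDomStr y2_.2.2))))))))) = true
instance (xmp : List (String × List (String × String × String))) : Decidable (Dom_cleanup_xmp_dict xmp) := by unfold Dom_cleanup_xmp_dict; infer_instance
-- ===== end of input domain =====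

-- B detects duplicate keys by sorting each namespace's keys and scanning adjacent pairs,
-- instead of A's incremental membership test while building the dict (objective: alternative).

-- ===== PORT A =====
def cleanup_xmp_dict (xmp : List (String × List (String × String × String))) : List (String × List (String × String)) :=
  (xmp.foldl
    (fun rc p =>
      let ns := p.2.foldl
        (fun ns kv =>
          if ns.contains kv.1 then ns   -- Python: raise Exception("malformated input"); excluded by Pre_
          else ns.insert kv.1 kv.2.1)
        (PySem.Dict.empty : PySem.Dict String String)
      rc.insert p.1 ns.items)
    (PySem.Dict.empty : PySem.Dict String (List (String × String)))).items

-- ===== PORT B =====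
def cleanup_xmp_dict_alt (xmp : List (String × List (String × String × String))) : List (String × List (String × String)) :=
  (xmp.foldl
    (fun rc p =>
      let keys := PySem.List.sorted (p.2.map (fun kv => kv.1)) (fun k => k) false
      -- for a, b in zip(keys, keys[1:]): if a == b: raise  (the raise is excluded by Pre_)
      if (keys.zip (keys.drop 1)).any (fun ab => ab.1 == ab.2) then rc
      else rc.insert p.1 (PySem.Dict.ofList (p.2.map (fun kv => (kv.1, kv.2.1)))).items)
    (PySem.Dict.empty : PySem.Dict String (List (String × String)))).items

-- ===== PRECONDITION & SPEC =====
-- Pre_ excludes exactly the inputs where some namespace list carries a duplicate key: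
-- there Python A raises Exception("malformated input") (and Python B raises too).
def Pre_cleanup_xmp_dict (xmp : List (String × List (String × String × String))) : Prop :=
  ∀ p ∈ xmp, (p.2.map (fun kv => kv.1)).Nodup
instance (xmp : List (String × List (String × String × String))) : Decidable (Pre_cleanup_xmp_dict xmp) := by unfold Pre_cleanup_xmp_dict; infer_instance

def pvWitness_cleanup_xmp_dict : (List (String × List (String × String × String))) :=
  [("dc", [("title", "A Day", "x"), ("creator", "me", "y")]), ("xmp", [])]

def Spec_cleanup_xmp_dict (xmp : List (String × List (String × String × String))) (out : List (String × List (String × String))) : Prop := out = cleanup_xmp_dict_alt xmp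
instance (xmp : List (String × List (String × String × String))) (out : List (String × List (String × String))) : Decidable (Spec_cleanup_xmp_dict xmp out) := by unfold Spec_cleanup_xmp_dict; infer_instance

-- ===== CLAIM (what is proved, stated in full; the proofs are below) =====
def Claim_equal_cleanup_xmp_dict : Prop := ∀ (xmp : List (String × List (String × String × String))), Dom_cleanup_xmp_dict xmp → Pre_cleanup_xmp_dict xmp → Spec_cleanup_xmp_dict xmp (cleanup_xmp_dict xmp)

-- ===== LEMMAS AND PROOFS =====

-- A list without duplicates has no equal adjacent pair.
theorem nodup_no_adj (l : List String) (h : l.Nodup) :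
    (l.zip (l.drop 1)).any (fun ab => ab.1 == ab.2) = false := by
  induction l with
  | nil => rfl
  | cons a t ih =>
    cases t with
    | nil => rfl
    | cons b t2 =>
      simp only [List.drop_one, List.tail_cons, List.zip_cons_cons, List.any_cons,
        Bool.or_eq_false_iff]
      constructor
      · have hab : a ≠ b := by
          simp only [List.nodup_cons, List.mem_cons] at h
          exact fun he => h.1 (Or.inl he)
        simpa using hab
      · have := ih h.of_cons
        simpa [List.drop_one] using this

-- A's guarded inner loop never hits the guard when the keys are fresh and distinct,
-- so it is the plain insert fold.
theorem inner_guard_dead (L : List (String × String × String))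
    (d : PySem.Dict String String)
    (hf : ∀ kv ∈ L, d.contains kv.1 = false)
    (hnd : (L.map (fun kv => kv.1)).Nodup) :
    L.foldl (fun ns kv => if ns.contains kv.1 then ns else ns.insert kv.1 kv.2.1) d
      = L.foldl (fun ns kv => ns.insert kv.1 kv.2.1) d := by
  induction L generalizing d with
  | nil => rfl
  | cons kv tl ih =>
    simp only [List.foldl_cons]
    rw [hf kv (by simp)]
    simp only [if_neg Bool.false_ne_true]
    apply ih
    · intro kv' h'
      rw [PySem.Dict.contains_insert]
      have hne : kv'.1 ≠ kv.1 := by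
        simp only [List.map_cons, List.nodup_cons] at hnd
        intro he
        exact hnd.1 (he ▸ List.mem_map_of_mem h')
      simp [hne, hf kv' (List.mem_cons_of_mem _ h')]
    · simpa using hnd.of_cons

-- Under the no-duplicate precondition B's sort-and-scan finds no adjacent duplicate,
-- and A's guarded fold builds exactly the dict of the pair list.
theorem inner_eq (L : List (String × String × String))
    (hnd : (L.map (fun kv => kv.1)).Nodup) :
    ((PySem.List.sorted (L.map (fun kv => kv.1)) (fun k => k) false).zip
        ((PySem.List.sorted (L.map (fun kv => kv.1)) (fun k => k) false).drop 1)).any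
        (fun ab => ab.1 == ab.2) = false
    ∧ (L.foldl (fun ns kv => if ns.contains kv.1 then ns else ns.insert kv.1 kv.2.1)
        (PySem.Dict.empty : PySem.Dict String String)).items
      = (PySem.Dict.ofList (L.map (fun kv => (kv.1, kv.2.1)))).items := by
  constructor
  · exact nodup_no_adj _ ((PySem.List.sorted_perm _ _ _).nodup_iff.mpr hnd)
  · have hof : PySem.Dict.ofList (L.map (fun kv => (kv.1, kv.2.1)))
        = L.foldl (fun ns kv => ns.insert kv.1 kv.2.1)
            (PySem.Dict.empty : PySem.Dict String String) := by
      show (L.map (fun kv => (kv.1, kv.2.1))).foldl (fun d p => d.insert p.1 p.2) PySem.Dict.empty = _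
      rw [List.foldl_map]
    rw [inner_guard_dead L _ (by intro kv _; exact PySem.Dict.contains_empty _) hnd, hof]

-- ===== VERDICT (by name: the statement is the Claim_ definition above) =====
theorem cleanup_xmp_dict_spec : Claim_equal_cleanup_xmp_dict := by
  intro xmp _ hpre
  unfold Spec_cleanup_xmp_dict cleanup_xmp_dict cleanup_xmp_dict_alt
  congr 1
  apply PySem.List.foldl_congr_mem
  intro rc p hp
  have h := inner_eq p.2 (hpre p hp)
  simp only [h.2, h.1, Bool.false_eq_true, if_false]
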